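-- pv_equiv track=rewrite | github.com/lwperrin/projet_web | source/bacterial_genome_annotation/utils.py | cds2compact
-- ===== SOURCE A (Python) =====
-- def cds2compact(sequence: str) -> str:
--     """
--     Compress a DNA sequence from base 15 to base 15**4
--     :param sequence:str: The full DNA sequence
--     :return: The compressed DNA sequence.
--     """
--     letter2number = {'A': 0, 'C': 1, 'G': 2, 'T': 3, 'R': 4, 'Y': 5, 'S': 6, 'W': 7, 'K': 8, 'M': 9, 'B': 10, 'D': 11,
--                      'H': 12, 'V': 13, 'N': 14}
--     prefix = (4 - len(sequence) % 4) % 4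
--     sequence = 'A' * prefix + sequence
--     result = chr(prefix)
--     for i in range(len(sequence) // 4):
--         s = 0
--         for j in range(4):
--             s += 15 ** j * letter2number[sequence[4 * i + j]]
--         result = result + chr(s)
--     return result
-- ===== SOURCE B (Python) =====
-- def cds2compact(sequence: str) -> str:
--     """Single streaming pass: accumulate each chunk's value with a position
--     counter instead of the indexed nested loops; collect chars and join."""
--     letter2number = {'A': 0, 'C': 1, 'G': 2, 'T': 3, 'R': 4, 'Y': 5, 'S': 6, 'W': 7, 'K': 8, 'M': 9, 'B': 10, 'D': 11,
--                      'H': 12, 'V': 13, 'N': 14}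
--     prefix = (4 - len(sequence) % 4) % 4
--     out = [chr(prefix)]
--     s = 0
--     cnt = 0
--     for c in 'A' * prefix + sequence:
--         s += letter2number[c] * 15 ** cnt
--         cnt += 1
--         if cnt == 4:
--             out.append(chr(s))
--             s = 0
--             cnt = 0
--     return ''.join(out)
-- ===== Notes on version B (the rewrite author's own statement) =====
-- stated objective: alternative
-- what changed: Replaced the range(len//4) outer loop with nested range(4) indexing by a single streaming pass over the characters keeping a running chunk value and position counter, appending a char every 4 symbols and joining at the end.
-- outside the precondition, e.g. on cds2compact('ACGX'): A raises KeyError, B raises KeyError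
import Mathlib
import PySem

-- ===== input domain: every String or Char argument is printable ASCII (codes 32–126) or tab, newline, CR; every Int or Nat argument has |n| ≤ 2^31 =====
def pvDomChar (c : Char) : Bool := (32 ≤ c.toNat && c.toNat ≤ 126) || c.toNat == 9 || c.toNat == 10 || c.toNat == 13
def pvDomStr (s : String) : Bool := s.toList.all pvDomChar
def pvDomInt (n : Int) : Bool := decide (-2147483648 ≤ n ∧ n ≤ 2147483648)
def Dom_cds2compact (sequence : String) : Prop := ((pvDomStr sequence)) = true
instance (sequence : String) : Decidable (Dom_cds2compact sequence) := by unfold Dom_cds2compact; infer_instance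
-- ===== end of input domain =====

-- B replaces A's chunk-indexed nested loops by one streaming pass with a running
-- chunk value and position counter (objective: alternative decomposition, same cost).

-- the dict literal both Pythons build
def letter2number : PySem.Dict Char Int :=
  PySem.Dict.ofList [('A',0),('C',1),('G',2),('T',3),('R',4),('Y',5),('S',6),('W',7),
                     ('K',8),('M',9),('B',10),('D',11),('H',12),('V',13),('N',14)]

-- letter2number[c]; a missing key is Python's KeyError, excluded by Pre_, so the default 0 is never read
def l2n (c : Char) : Int := (PySem.Dict.get? letter2number c).getD 0

-- ===== PORT A =====
def cds2compact (sequence : String) : String :=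
  let pfx : Int := PySem.Int.mod (4 - PySem.Int.mod (sequence.toList.length : Int) 4) 4
  let seq := List.replicate pfx.toNat 'A' ++ sequence.toList     -- 'A' * prefix + sequence  (0 ≤ pfx)
  -- chr(k) for 0 ≤ k < 15^4 < 0xD800 is exactly Char.ofNat
  let result := (PySem.List.pyRange 0 (PySem.Int.floordiv (seq.length : Int) 4) 1).foldl
    (fun r i =>
      -- sequence[4*i+j]: the index is always in range, so the pyGetD default is never read
      r ++ [Char.ofNat ((PySem.List.pyRange 0 4 1).foldl
        (fun s j => s + 15 ^ j.toNat * l2n (PySem.List.pyGetD seq (4 * i + j) 'A')) 0).toNat])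
    [Char.ofNat pfx.toNat]
  String.ofList result

-- ===== PORT B =====
def cds2compact_alt (sequence : String) : String :=
  let pfx : Int := PySem.Int.mod (4 - PySem.Int.mod (sequence.toList.length : Int) 4) 4
  let st := (List.replicate pfx.toNat 'A' ++ sequence.toList).foldl
    (fun (st : Int × Int × List Char) c =>
      if st.2.1 + 1 == 4 then (0, 0, st.2.2 ++ [Char.ofNat (st.1 + l2n c * 15 ^ st.2.1.toNat).toNat])
      else (st.1 + l2n c * 15 ^ st.2.1.toNat, st.2.1 + 1, st.2.2))
    (0, 0, [Char.ofNat pfx.toNat])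
  String.ofList st.2.2

-- ===== PRECONDITION & SPEC =====
-- Pre_ excludes inputs containing a character outside the 15-letter IUPAC alphabet, on which A raises KeyError.
def Pre_cds2compact (sequence : String) : Prop :=
  (sequence.toList.all
    (fun c => ['A','C','G','T','R','Y','S','W','K','M','B','D','H','V','N'].contains c)) = true
instance (sequence : String) : Decidable (Pre_cds2compact sequence) := by unfold Pre_cds2compact; infer_instance
def pvWitness_cds2compact : String := "ACGT"

def Spec_cds2compact (sequence : String) (out : String) : Prop := out = cds2compact_alt sequence
instance (sequence : String) (out : String) : Decidable (Spec_cds2compact sequence out) := by unfold Spec_cds2compact; infer_instance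

-- ===== CLAIM (what is proved, stated in full; the proofs are below) =====
def Claim_equal_cds2compact : Prop := ∀ (sequence : String), Dom_cds2compact sequence → Pre_cds2compact sequence → Spec_cds2compact sequence (cds2compact sequence)

-- ===== LEMMAS AND PROOFS =====

-- the char both programs emit for one 4-letter chunk
def pack (a b c d : Char) : Char :=
  Char.ofNat (l2n a + 15 * l2n b + 225 * l2n c + 3375 * l2n d).toNat

-- the sequence of chunk chars of a padded sequence
def packAll : List Char → List Char
  | a :: b :: c :: d :: rest => pack a b c d :: packAll rest
  | _ => []

-- B's loop on a 4k-list ends with zeroed accumulator/counter and the chunk chars appended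
theorem b_loop (k : ℕ) : ∀ (l : List Char) (out : List Char), l.length = 4 * k →
    l.foldl (fun (st : Int × Int × List Char) c =>
      if st.2.1 + 1 == 4 then (0, 0, st.2.2 ++ [Char.ofNat (st.1 + l2n c * 15 ^ st.2.1.toNat).toNat])
      else (st.1 + l2n c * 15 ^ st.2.1.toNat, st.2.1 + 1, st.2.2))
      (0, 0, out) = (0, 0, out ++ packAll l) := by
  induction k with
  | zero =>
    intro l out h
    cases l with
    | nil => simp [packAll]
    | cons a t => simp at h
  | succ k ih =>
    intro l out h
    rcases l with _ | ⟨a, l⟩; · simp at h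
    rcases l with _ | ⟨b, l⟩; · simp at h; omega
    rcases l with _ | ⟨c, l⟩; · simp at h; omega
    rcases l with _ | ⟨d, rest⟩; · simp at h; omega
    have hr : rest.length = 4 * k := by simp at h; omega
    simp only [List.foldl_cons]
    show List.foldl _ (0, 0, out ++ [Char.ofNat ((0 + l2n a * 15 ^ (0:Int).toNat
        + l2n b * 15 ^ ((0:Int)+1).toNat + l2n c * 15 ^ ((0:Int)+1+1).toNat
        + l2n d * 15 ^ ((0:Int)+1+1+1).toNat)).toNat]) rest
      = (0, 0, out ++ packAll (a :: b :: c :: d :: rest))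
    rw [ih _ _ hr]
    have hc : Char.ofNat ((0 + l2n a * 15 ^ (0:Int).toNat
        + l2n b * 15 ^ ((0:Int)+1).toNat + l2n c * 15 ^ ((0:Int)+1+1).toNat
        + l2n d * 15 ^ ((0:Int)+1+1+1).toNat)).toNat = pack a b c d := by
      simp only [pack]
      congr 2
      simp only [show ((0:Int)).toNat = 0 by decide, show ((0:Int)+1).toNat = 1 by decide,
        show ((0:Int)+1+1).toNat = 2 by decide, show ((0:Int)+1+1+1).toNat = 3 by decide]
      ring
    rw [hc]
    simp [packAll, List.append_assoc]

-- A's loop over range(a, a+k), indexing a sequence whose tail from 4a has length 4k, appends the chunk chars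
theorem a_loop (k : ℕ) : ∀ (a : ℕ) (seq l r : List Char),
    seq.drop (4 * a) = l → l.length = 4 * k →
    (PySem.List.pyRange (a : Int) ((a : Int) + (k : Int)) 1).foldl
      (fun r i =>
        r ++ [Char.ofNat ((PySem.List.pyRange 0 4 1).foldl
          (fun s j => s + 15 ^ j.toNat * l2n (PySem.List.pyGetD seq (4 * i + j) 'A')) 0).toNat])
      r = r ++ packAll l := by
  induction k with
  | zero =>
    intro a seq l r hd hl
    cases l with
    | nil =>
      have hnil : PySem.List.pyRange (a : Int) ((a : Int) + ((0 : Nat) : Int)) 1 = [] :=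
        PySem.List.pyRange_one_eq_nil (by simp)
      rw [hnil]
      simp [packAll]
    | cons w t => simp at hl
  | succ k ih =>
    intro a seq l r hd hl
    rcases l with _ | ⟨w, l⟩; · simp at hl
    rcases l with _ | ⟨x, l⟩; · simp at hl; omega
    rcases l with _ | ⟨y, l⟩; · simp at hl; omega
    rcases l with _ | ⟨z, rest⟩; · simp at hl; omega
    have hrest : rest.length = 4 * k := by simp at hl; omega
    rw [PySem.List.pyRange_one_cons (show (a : Int) < (a : Int) + ((k+1 : Nat) : Int) by push_cast; omega)]
    simp only [List.foldl_cons]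
    have hs : ((PySem.List.pyRange 0 4 1).foldl
        (fun s j => s + 15 ^ j.toNat * l2n (PySem.List.pyGetD seq (4 * (a : Int) + j) 'A')) 0)
        = l2n w + 15 * l2n x + 225 * l2n y + 3375 * l2n z := by
      have h4 : PySem.List.pyRange 0 4 1 = [(0:Int), 1, 2, 3] := by decide
      have e0 : PySem.List.pyGetD seq (4 * (a:Int) + 0) 'A' = w := by
        rw [show (4 * (a:Int) + 0) = ((4*a + 0 : Nat) : Int) by push_cast; ring,
          PySem.List.pyGetD_natCast, List.getD_eq_getElem?_getD, ← List.getElem?_drop, hd]; rfl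
      have e1 : PySem.List.pyGetD seq (4 * (a:Int) + 1) 'A' = x := by
        rw [show (4 * (a:Int) + 1) = ((4*a + 1 : Nat) : Int) by push_cast; ring,
          PySem.List.pyGetD_natCast, List.getD_eq_getElem?_getD, ← List.getElem?_drop, hd]; rfl
      have e2 : PySem.List.pyGetD seq (4 * (a:Int) + 2) 'A' = y := by
        rw [show (4 * (a:Int) + 2) = ((4*a + 2 : Nat) : Int) by push_cast; ring,
          PySem.List.pyGetD_natCast, List.getD_eq_getElem?_getD, ← List.getElem?_drop, hd]; rfl
      have e3 : PySem.List.pyGetD seq (4 * (a:Int) + 3) 'A' = z := by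
        rw [show (4 * (a:Int) + 3) = ((4*a + 3 : Nat) : Int) by push_cast; ring,
          PySem.List.pyGetD_natCast, List.getD_eq_getElem?_getD, ← List.getElem?_drop, hd]; rfl
      rw [h4]
      simp only [List.foldl_cons, List.foldl_nil, e0, e1, e2, e3]
      simp only [show ((0:Int)).toNat = 0 by decide, show ((1:Int)).toNat = 1 by decide,
        show ((2:Int)).toNat = 2 by decide, show ((3:Int)).toNat = 3 by decide]
      ring
    show List.foldl _
        (r ++ [Char.ofNat ((PySem.List.pyRange 0 4 1).foldl
          (fun s j => s + 15 ^ j.toNat * l2n (PySem.List.pyGetD seq (4 * (a:Int) + j) 'A')) 0).toNat])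
        (PySem.List.pyRange ((a:Int) + 1) ((a:Int) + ((k+1 : Nat) : Int)) 1)
      = r ++ packAll (w :: x :: y :: z :: rest)
    rw [hs]
    rw [show ((a:Int) + 1) = (((a+1 : Nat)) : Int) by push_cast; ring,
        show ((a:Int) + ((k+1 : Nat) : Int)) = (((a+1 : Nat)) : Int) + (k : Int) by push_cast; ring]
    have hd' : seq.drop (4 * (a + 1)) = rest := by
      have := congrArg (List.drop 4) hd
      rw [List.drop_drop] at this
      rw [show 4 * (a + 1) = 4 * a + 4 by ring]
      simpa using this
    rw [ih (a + 1) seq rest _ hd' hrest]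
    simp [packAll, pack, List.append_assoc]

-- ===== VERDICT (by name: the statement is the Claim_ definition above) =====
theorem cds2compact_spec : Claim_equal_cds2compact := by
  intro sequence _ _
  unfold Spec_cds2compact
  simp only [cds2compact, cds2compact_alt]
  set n := sequence.toList.length with hn
  set p : Int := PySem.Int.mod (4 - PySem.Int.mod (n : Int) 4) 4 with hp
  have hpe : p = (4 - (n : Int) % 4) % 4 := by
    rw [hp, PySem.Int.mod_eq_emod_of_pos (by norm_num), PySem.Int.mod_eq_emod_of_pos (by norm_num)]
  set L := List.replicate p.toNat 'A' ++ sequence.toList with hLdef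
  have hLlen : L.length = p.toNat + n := by simp [hLdef, hn]
  have hL : L.length = 4 * ((p.toNat + n) / 4) := by rw [hLlen]; omega
  have hfd : PySem.Int.floordiv ((L.length : Int)) 4 = (0 : Int) + (((p.toNat + n) / 4 : Nat) : Int) := by
    rw [PySem.Int.floordiv_eq_ediv_of_pos (by norm_num), hLlen]
    push_cast
    omega
  have hA := a_loop ((p.toNat + n) / 4) 0 L L [Char.ofNat p.toNat] (by simp) (by rw [hL])
  simp only [Nat.cast_zero] at hA
  rw [hfd, hA, b_loop ((p.toNat + n) / 4) L [Char.ofNat p.toNat] (by rw [hL])]
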